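-- pv_equiv track=rewrite | github.com/LngDc/PTIT-Python | so_locphat_dep.py | check
-- ===== SOURCE A (Python) =====
-- def check(s):
--     if s[0] != '6':
--         return False
--     if s.count('888'):
--         return False
--     if any(digit != '6' and digit != '8' for digit in s):
--         return False
--     return True
-- ===== SOURCE B (Python) =====
-- def check(s):
--     if s[0] != '6':
--         return False
--     run = 0
--     for ch in s:
--         if ch == '8':
--             run += 1
--             if run >= 3:
--                 return False
--         elif ch == '6':
--             run = 0
--         else:
--             return False
--     return True
-- ===== Notes on version B (the rewrite author's own statement) =====
-- stated objective: alternative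
-- what changed: Replaced A's three separate scans (a substring count for a triple of eights, then an any() scan over all characters) by one single pass that keeps a run-length counter of consecutive eights and rejects bad characters and a run of three at once.
import Mathlib
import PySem

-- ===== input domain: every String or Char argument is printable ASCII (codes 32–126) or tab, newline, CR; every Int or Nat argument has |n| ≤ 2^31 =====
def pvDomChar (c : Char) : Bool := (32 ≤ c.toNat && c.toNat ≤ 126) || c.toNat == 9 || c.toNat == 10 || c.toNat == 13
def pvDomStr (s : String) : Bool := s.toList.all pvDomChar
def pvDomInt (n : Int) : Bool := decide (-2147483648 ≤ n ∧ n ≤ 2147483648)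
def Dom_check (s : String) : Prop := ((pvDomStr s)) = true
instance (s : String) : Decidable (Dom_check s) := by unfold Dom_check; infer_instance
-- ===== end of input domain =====

-- B merges A's three scans (first char, triple-eight substring count, all-chars check) into one
-- single pass keeping a run-length counter of consecutive '8's (objective: alternative).


-- ===== PORT A =====
def check (s : String) : Bool :=
  match PySem.Str.pyGet? s 0 with          -- s[0]; none = IndexError, excluded by Pre_check
  | none => false
  | some c0 =>
    if c0 != '6' then false
    else if PySem.Str.count s "888" ≠ 0 then false
    else if s.toList.any (fun digit => digit != '6' && digit != '8') then false
    else true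

-- ===== PORT B =====
-- the for-loop of Source B with its `run` counter and early returns
def altLoop : List Char → Nat → Bool
  | [], _ => true
  | ch :: rest, run =>
    if ch == '8' then
      (if run + 1 ≥ 3 then false else altLoop rest (run + 1))
    else if ch == '6' then altLoop rest 0
    else false

def check_alt (s : String) : Bool :=
  match PySem.Str.pyGet? s 0 with          -- s[0]; none = IndexError, excluded by Pre_check
  | none => false
  | some c0 =>
    if c0 != '6' then false
    else altLoop s.toList 0

-- ===== PRECONDITION & SPEC =====
-- Pre_ excludes only the empty string, on which Python's s[0] raises IndexError (in A and B alike).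
def Pre_check (s : String) : Prop := s ≠ ""
instance (s : String) : Decidable (Pre_check s) := by unfold Pre_check; infer_instance
def pvWitness_check : String := "68"
def Spec_check (s : String) (out : Bool) : Prop := out = check_alt s
instance (s : String) (out : Bool) : Decidable (Spec_check s out) := by unfold Spec_check; infer_instance

-- ===== CLAIM (what is proved, stated in full; the proofs are below) =====
def Claim_equal_check : Prop := ∀ (s : String), Dom_check s → Pre_check s → Spec_check s (check s)

-- ===== LEMMAS AND PROOFS =====

lemma count_go_le (sub : List Char) : ∀ (fuel : Nat) (l : List Char) (acc : Nat),
    acc ≤ PySem.Chars.count.go sub fuel l acc := by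
  intro fuel
  induction fuel with
  | zero => intro l acc; simp [PySem.Chars.count.go]
  | succ n ih =>
    intro l acc
    cases l with
    | nil => simp [PySem.Chars.count.go]
    | cons h t =>
      simp only [PySem.Chars.count.go]
      split
      · exact le_trans (Nat.le_succ acc) (ih _ _)
      · exact ih _ _

lemma count_go_eq_acc_iff (sub : List Char) (hsub : sub ≠ []) :
    ∀ (fuel : Nat) (l : List Char) (acc : Nat), l.length ≤ fuel →
      (PySem.Chars.count.go sub fuel l acc = acc ↔ ¬ sub <:+: l) := by
  intro fuel
  induction fuel with
  | zero =>
    intro l acc hlen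
    have : l = [] := by cases l <;> simp_all
    subst this
    simp [PySem.Chars.count.go, List.infix_iff_prefix_suffix, hsub]
  | succ n ih =>
    intro l acc hlen
    cases l with
    | nil => simp [PySem.Chars.count.go, hsub]
    | cons h t =>
      simp only [PySem.Chars.count.go]
      split
      · rename_i hpre
        have hpre' : sub <+: h :: t := List.isPrefixOf_iff_prefix.mp hpre
        have h1 : acc + 1 ≤ PySem.Chars.count.go sub n (List.drop sub.length (h :: t)) (acc + 1) :=
          count_go_le sub n _ _
        constructor
        · intro he; omega
        · intro hni; exact absurd hpre'.isInfix hni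
      · rename_i hpre
        have hpre' : ¬ sub <+: h :: t := fun hp => hpre (List.isPrefixOf_iff_prefix.mpr hp)
        rw [ih t acc (by simpa using Nat.lt_succ_iff.mp (Nat.lt_of_lt_of_le (Nat.lt_succ_of_le (Nat.le_refl _)) (by simpa using hlen)))]
        rw [List.infix_cons_iff]
        tauto

lemma count888_eq_zero_iff (l : List Char) :
    PySem.Chars.count l ['8', '8', '8'] = 0 ↔ ¬ ['8', '8', '8'] <:+: l := by
  unfold PySem.Chars.count
  simp only [List.isEmpty_cons, if_false]
  exact count_go_eq_acc_iff ['8', '8', '8'] (by simp) l.length l 0 le_rfl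

lemma infix_through_six (run : Nat) (hrun : run ≤ 2) (rest : List Char) :
    (['8', '8', '8'] <:+: (List.replicate run '8' ++ '6' :: rest)) ↔
      ['8', '8', '8'] <:+: rest := by
  interval_cases run <;>
    simp [List.infix_cons_iff, List.cons_prefix_cons]

lemma altLoop_iff : ∀ (l : List Char) (run : Nat), run ≤ 2 →
    (altLoop l run = true ↔
      ((∀ c ∈ l, c = '6' ∨ c = '8') ∧
        ¬ (['8', '8', '8'] <:+: (List.replicate run '8' ++ l)))) := by
  intro l
  induction l with
  | nil =>
    intro run hrun
    simp only [altLoop, List.append_nil]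
    constructor
    · intro _
      refine ⟨by simp, fun hinf => ?_⟩
      have := hinf.length_le
      simp at this; omega
    · intro _; trivial
  | cons ch rest ih =>
    intro run hrun
    by_cases h8 : ch = '8'
    · subst h8
      by_cases hr2 : run = 2
      · subst hr2
        simp only [altLoop, beq_self_eq_true, if_true, if_pos (by omega : 2 + 1 ≥ 3)]
        constructor
        · intro h; exact absurd h (by simp)
        · rintro ⟨-, hni⟩
          exact absurd ⟨[], rest, by simp [List.replicate]⟩ hni
      · have hlt : run + 1 ≤ 2 := by omega
        have heq : List.replicate run '8' ++ '8' :: rest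
            = List.replicate (run + 1) '8' ++ rest := by
          rw [List.replicate_succ']; simp
        simp only [altLoop, beq_self_eq_true, if_true, if_neg (by omega : ¬ run + 1 ≥ 3)]
        rw [ih (run + 1) hlt, heq]
        simp
    · by_cases h6 : ch = '6'
      · subst h6
        simp only [altLoop, if_neg (by simp : ¬ (('6' : Char) == '8') = true),
          beq_self_eq_true, if_true]
        rw [ih 0 (by omega), infix_through_six run hrun rest]
        simp
      · simp only [altLoop, if_neg (by simp [h8] : ¬ (ch == '8') = true),
          if_neg (by simp [h6] : ¬ (ch == '6') = true)]
        constructor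
        · intro h; exact absurd h (by simp)
        · rintro ⟨hgood, -⟩
          rcases hgood ch (by simp) with h | h <;> [exact absurd h h6; exact absurd h h8]

-- ===== VERDICT (by name: the statement is the Claim_ definition above) =====
theorem check_spec : Claim_equal_check := by
  intro s _ hpre
  unfold Spec_check check check_alt
  obtain ⟨c, cs, hl⟩ : ∃ c cs, s.toList = c :: cs := by
    cases h : s.toList with
    | nil => exact absurd (by simpa using h) hpre
    | cons c cs => exact ⟨c, cs, rfl⟩
  have hget : PySem.Str.pyGet? s 0 = some c := by
    simp [hl, PySem.List.pyGet?_zero_cons]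
  rw [hget]
  by_cases hc : c = '6'
  · subst hc
    simp only [bne_self_eq_false, Bool.false_eq_true, if_false]
    rw [Bool.eq_iff_iff, altLoop_iff s.toList 0 (by omega)]
    simp only [List.replicate, List.nil_append]
    have hcount : PySem.Str.count s "888" = PySem.Chars.count s.toList ['8', '8', '8'] := by
      simp [PySem.Str.count_eq]
    split_ifs with h1 h2
    · rw [hcount] at h1
      simp only [Bool.false_eq_true, false_iff]
      rintro ⟨-, hni⟩
      exact h1 ((count888_eq_zero_iff s.toList).mpr hni)
    · simp only [List.any_eq_true] at h2
      obtain ⟨d, hd, hbad⟩ := h2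
      simp only [Bool.and_eq_true, bne_iff_ne] at hbad
      simp only [Bool.false_eq_true, false_iff]
      rintro ⟨hgood, -⟩
      rcases hgood d hd with h | h <;> simp_all
    · simp only [true_iff]
      refine ⟨?_, ?_⟩
      · intro d hd
        by_contra hbd
        push_neg at hbd
        exact h2 (List.any_eq_true.mpr ⟨d, hd, by simp [hbd.1, hbd.2]⟩)
      · rw [hcount] at h1
        exact (count888_eq_zero_iff s.toList).mp (by omega)
  · simp [bne_iff_ne, hc]
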